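-- pv_equiv track=rewrite | github.com/jkalexho220/Ascension | rmsify.py | removeStrings
-- ===== SOURCE A (Python) =====
-- def removeStrings(line):
-- 	retline = ""
-- 	isString = False
-- 	for token in line:
-- 		if token == '"':
-- 			isString = not isString
-- 		if not isString or token == '"':
-- 			retline = retline + token
-- 	if "//" in retline:
-- 		retline = retline[:retline.find("//")]
-- 	return retline
-- ===== SOURCE B (Python) =====
-- def removeStrings(line):
--     parts = line.split('"')
--     stripped = '"'.join(p if i % 2 == 0 else "" for i, p in enumerate(parts))
--     return stripped.split("//")[0]
-- ===== Notes on version B (the rewrite author's own statement) =====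
-- stated objective: simpler
-- what changed: Replaced A's character-by-character quote state machine (toggling an isString flag while concatenating kept characters one by one) and its find/slice comment truncation by three staged passes: split on '"', blank the odd-indexed (in-string) segments via enumerate, rejoin with '"', then take split('//')[0].
import Mathlib
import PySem

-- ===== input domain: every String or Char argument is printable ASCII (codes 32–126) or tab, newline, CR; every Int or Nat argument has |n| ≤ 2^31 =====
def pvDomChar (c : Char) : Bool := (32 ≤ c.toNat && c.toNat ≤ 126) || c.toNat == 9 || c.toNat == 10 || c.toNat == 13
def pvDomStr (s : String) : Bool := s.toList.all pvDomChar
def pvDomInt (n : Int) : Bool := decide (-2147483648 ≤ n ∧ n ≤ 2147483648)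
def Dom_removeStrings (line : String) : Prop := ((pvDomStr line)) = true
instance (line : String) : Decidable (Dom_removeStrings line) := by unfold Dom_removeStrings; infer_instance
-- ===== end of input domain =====

-- B replaces A's per-character quote state machine and find/slice truncation by
-- split-on-'"' / blank odd-indexed segments / rejoin, then split("//")[0] (simpler decomposition).

-- ===== PORT A =====
-- A: fold over the characters, toggling isString at each '"', keeping a char iff
-- not inside a string or it is the quote itself; then truncate at the first "//".
def pvStepA (st : List Char × Bool) (token : Char) : List Char × Bool :=
  let isString := if token = '"' then !st.2 else st.2
  ((if !isString || token = '"' then st.1 ++ [token] else st.1), isString)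

def removeStrings (line : String) : String :=
  let st := line.toList.foldl pvStepA ([], false)
  let retline := st.1
  let retline :=
    if PySem.Chars.isIn ['/', '/'] retline then
      PySem.Chars.slice retline none (some (PySem.Chars.find retline ['/', '/']))
    else retline
  String.ofList retline

-- ===== PORT B =====
-- B: split on '"', keep even-indexed segments and blank the odd (in-string) ones,
-- rejoin with '"', then take everything before the first "//" via split("//")[0].
def removeStrings_alt (line : String) : String :=
  let parts := PySem.Chars.splitOn line.toList ['"']
  let stripped := PySem.Chars.join ['"']
      ((PySem.List.enumerate parts).map (fun ip => if ip.1 % 2 == 0 then ip.2 else []))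
  String.ofList ((PySem.Chars.splitOn stripped ['/', '/']).headD [])

-- ===== PRECONDITION & SPEC =====
def Spec_removeStrings (line : String) (out : String) : Prop := out = removeStrings_alt line
instance (line : String) (out : String) : Decidable (Spec_removeStrings line out) := by unfold Spec_removeStrings; infer_instance

-- ===== CLAIM (what is proved, stated in full; the proofs are below) =====
def Claim_equal_removeStrings : Prop := ∀ (line : String), Dom_removeStrings line → Spec_removeStrings line (removeStrings line)

-- ===== LEMMAS AND PROOFS =====

-- The common "skeleton": the stripped line as a clean recursion.
def pvStrip (b : Bool) : List Char → List Char
  | [] => []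
  | c :: t => if c = '"' then '"' :: pvStrip (!b) t
              else if b then pvStrip b t else c :: pvStrip b t

-- A clean structural version of split-on-'"'.
def pvSplitQ : List Char → List (List Char)
  | [] => [[]]
  | c :: t =>
    if c = '"' then [] :: pvSplitQ t
    else match pvSplitQ t with
      | [] => [[c]]
      | p :: ps => (c :: p) :: ps

-- everything before the first "//", as a clean recursion
def pvTrunc : List Char → List Char
  | [] => []
  | [c] => [c]
  | c :: d :: t => if c = '/' ∧ d = '/' then [] else c :: pvTrunc (d :: t)

lemma pvSplitQ_ne_nil (cs : List Char) : pvSplitQ cs ≠ [] := by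
  cases cs with
  | nil => simp [pvSplitQ]
  | cons c t =>
    simp only [pvSplitQ]
    split
    · simp
    · split <;> simp_all

-- the final toggle state of A's fold
def pvFinal (b : Bool) : List Char → Bool
  | [] => b
  | c :: t => pvFinal (if c = '"' then !b else b) t

lemma pvFoldA (cs : List Char) : ∀ (acc : List Char) (b : Bool),
    cs.foldl pvStepA (acc, b) = (acc ++ pvStrip b cs, pvFinal b cs) := by
  induction cs with
  | nil => intro acc b; simp [pvStrip, pvFinal]
  | cons c t ih =>
    intro acc b
    rw [List.foldl_cons]
    by_cases hc : c = '"'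
    · subst hc
      cases b <;> simp [pvStepA, ih, pvStrip, pvFinal]
    · cases b <;> simp [pvStepA, hc, ih, pvStrip, pvFinal]

-- alternating blanking of segments
def pvBlank (b : Bool) : List (List Char) → List (List Char)
  | [] => []
  | p :: ps => (if b then p else []) :: pvBlank (!b) ps

-- B's enumerate/map keeps the even-indexed segments: it is the alternating blanking
lemma pvEnumMap (ps : List (List Char)) : ∀ (s : Int),
    (PySem.List.enumerate ps s).map (fun ip => if ip.1 % 2 == 0 then ip.2 else []) =
      pvBlank (s % 2 == 0) ps := by
  induction ps with
  | nil => intro s; simp [PySem.List.enumerate, pvBlank]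
  | cons p t ih =>
    intro s
    have hpar : (((s + 1) % 2 == 0) : Bool) = !((s % 2 == 0) : Bool) := by
      have h2 : (s + 1) % 2 = 1 - s % 2 := by omega
      rcases Int.emod_two_eq_zero_or_one s with h | h <;> simp [h, h2]
    simp only [PySem.List.enumerate_cons, List.map_cons, ih (s + 1), hpar, pvBlank]

-- the fuelled go of PySem.Chars.splitOn on ['"'], characterised against pvSplitQ
lemma pvGo (cs : List Char) : ∀ (fuel : Nat) (cur : List Char) (acc : List (List Char)),
    cs.length < fuel →
    PySem.Chars.splitOn.go ['"'] fuel cs cur acc =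
      acc.reverse ++ (match pvSplitQ cs with
        | [] => []
        | p :: ps => (cur.reverse ++ p) :: ps) := by
  induction cs with
  | nil =>
    intro fuel cur acc h
    match fuel, h with
    | fuel + 1, _ => simp [PySem.Chars.splitOn.go, pvSplitQ]
  | cons c rest ih =>
    intro fuel cur acc h
    match fuel, h with
    | fuel + 1, h =>
      obtain ⟨p, ps, hps⟩ := List.exists_cons_of_ne_nil (pvSplitQ_ne_nil rest)
      by_cases hc : c = '"'
      · subst hc
        rw [PySem.Chars.splitOn.go]
        simp only [List.isPrefixOf, BEq.rfl, Bool.true_and] at *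
        rw [if_pos (by simp)]
        simp only [List.length_nil, Nat.zero_add, List.length_cons, List.drop_succ_cons,
          List.drop_zero]
        rw [ih fuel [] (cur.reverse :: acc) (by simp only [List.length_cons] at h; omega)]
        simp [pvSplitQ, hps]
      · rw [PySem.Chars.splitOn.go]
        rw [if_neg (by simp [List.isPrefixOf]; exact fun hh => hc hh.symm),
          ih fuel (c :: cur) acc (by simp at h; omega)]
        simp [pvSplitQ, hc, hps]

-- PySem.Chars.splitOn on a single quote equals the structural pvSplitQ
lemma pvSplitOn_eq (cs : List Char) :
    PySem.Chars.splitOn cs ['"'] = pvSplitQ cs := by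
  obtain ⟨p, ps, hps⟩ := List.exists_cons_of_ne_nil (pvSplitQ_ne_nil cs)
  rw [PySem.Chars.splitOn, pvGo cs (cs.length + 1) [] [] (by omega)]
  simp [hps]

lemma pvIntercalate_cons_cons (sep a : List Char) (b : List Char) (l : List (List Char)) :
    List.intercalate sep (a :: b :: l) = a ++ sep ++ List.intercalate sep (b :: l) := by
  simp [List.intercalate, List.intersperse]

-- the join of the blanked split is the strip
lemma pvJoin_blank (cs : List Char) : ∀ b : Bool,
    List.intercalate ['"'] (pvBlank b (pvSplitQ cs)) = pvStrip (!b) cs := by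
  induction cs with
  | nil => intro b; cases b <;> simp [pvSplitQ, pvBlank, pvStrip, List.intercalate]
  | cons c t ih =>
    intro b
    obtain ⟨p, ps, hps⟩ := List.exists_cons_of_ne_nil (pvSplitQ_ne_nil t)
    by_cases hc : c = '"'
    · subst hc
      have h3 := ih (!b)
      rw [hps] at h3
      rw [show pvSplitQ ('"' :: t) = [] :: p :: ps by simp [pvSplitQ, hps]]
      simp only [pvBlank]
      cases b <;> (rw [pvIntercalate_cons_cons]; simp_all [pvStrip, pvBlank])
    · have h2 := ih b
      rw [hps] at h2
      simp only [pvSplitQ, if_neg hc, hps, pvBlank]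
      cases ps with
      | nil => cases b <;> simp_all [List.intercalate, pvStrip, pvBlank]
      | cons q qs =>
        simp only [pvBlank] at h2 ⊢
        rw [pvIntercalate_cons_cons] at h2 ⊢
        cases b <;> simp_all [pvStrip]

-- pvTrunc is a prefix of its argument
lemma pvTrunc_prefix (cs : List Char) : pvTrunc cs <+: cs := by
  induction cs with
  | nil => simp [pvTrunc]
  | cons c t ih =>
    cases t with
    | nil => simp [pvTrunc]
    | cons d t' =>
      simp only [pvTrunc]
      split
      · simp
      · exact List.cons_prefix_cons.mpr ⟨rfl, ih⟩

-- A's find of "//" in terms of pvTrunc: -1 iff no "//", else offset k plus the prefix length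
lemma pvFindGoEq (cs : List Char) : ∀ (k : Nat),
    PySem.Chars.find.go ['/', '/'] cs k =
      if pvTrunc cs = cs then -1 else ((k : Int) + (pvTrunc cs).length) := by
  induction cs with
  | nil => intro k; simp [PySem.Chars.find.go, pvTrunc]
  | cons c t ih =>
    intro k
    cases t with
    | nil =>
      simp [PySem.Chars.find.go, List.isPrefixOf, pvTrunc]
    | cons d t' =>
      rw [PySem.Chars.find.go]
      by_cases h : c = '/' ∧ d = '/'
      · obtain ⟨hc, hd⟩ := h
        subst hc; subst hd
        rw [if_pos (by simp [List.isPrefixOf])]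
        rw [if_neg (by simp [pvTrunc])]
        simp [pvTrunc]
      · have hstep : pvTrunc (c :: d :: t') = c :: pvTrunc (d :: t') := by
          simp [pvTrunc, h]
        rw [if_neg (by
          simp only [List.isPrefixOf, Bool.and_eq_true, beq_iff_eq]
          intro hh
          exact h ⟨hh.1.symm, hh.2.1.symm⟩)]
        rw [ih (k + 1), hstep]
        by_cases he : pvTrunc (d :: t') = d :: t'
        · rw [if_pos he, if_pos (by rw [he])]
        · rw [if_neg he, if_neg (by intro hc2; exact he (by injection hc2))]
          simp only [List.length_cons]
          push_cast
          ring

-- A's "if '//' in retline: retline[:retline.find('//')]" is exactly pvTrunc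
lemma pvTruncA (cs : List Char) :
    (if PySem.Chars.isIn ['/', '/'] cs then
        PySem.Chars.slice cs none (some (PySem.Chars.find cs ['/', '/']))
      else cs) = pvTrunc cs := by
  have hf : PySem.Chars.find cs ['/', '/'] =
      if pvTrunc cs = cs then -1 else ((pvTrunc cs).length : Int) := by
    rw [PySem.Chars.find, pvFindGoEq cs 0]
    split <;> simp
  by_cases he : pvTrunc cs = cs
  · rw [if_neg (by simp [PySem.Chars.isIn, hf, he]), he]
  · rw [if_pos (by simp [PySem.Chars.isIn, hf, he]), hf, if_neg he]
    show PySem.List.slice cs none (some ((pvTrunc cs).length : Int)) = pvTrunc cs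
    rw [PySem.List.slice_to]
    · simp only [Int.toNat_natCast]
      exact ((List.prefix_iff_eq_take.mp (pvTrunc_prefix cs))).symm
    · positivity

-- splitOn.go distributes over its accumulator
lemma pvGoAcc (fuel : Nat) : ∀ (sep cs cur : List Char) (acc : List (List Char)),
    PySem.Chars.splitOn.go sep fuel cs cur acc =
      acc.reverse ++ PySem.Chars.splitOn.go sep fuel cs cur [] := by
  induction fuel with
  | zero => intro sep cs cur acc; simp [PySem.Chars.splitOn.go]
  | succ fuel ih =>
    intro sep cs cur acc
    cases cs with
    | nil => simp [PySem.Chars.splitOn.go]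
    | cons c t =>
      rw [PySem.Chars.splitOn.go, PySem.Chars.splitOn.go]
      by_cases hp : sep.isPrefixOf (c :: t) = true
      · rw [if_pos hp, if_pos hp, ih, ih sep _ [] [List.reverse cur]]
        simp
      · rw [if_neg hp, if_neg hp, ih]

-- the first segment of splitOn.go on "//" with empty accumulator is pvTrunc
lemma pvGoHead (cs : List Char) : ∀ (fuel : Nat) (cur : List Char), cs.length < fuel →
    ∃ l, PySem.Chars.splitOn.go ['/', '/'] fuel cs cur [] =
      (cur.reverse ++ pvTrunc cs) :: l := by
  induction cs with
  | nil =>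
    intro fuel cur h
    match fuel, h with
    | fuel + 1, _ => exact ⟨[], by simp [PySem.Chars.splitOn.go, pvTrunc]⟩
  | cons c t ih =>
    intro fuel cur h
    match fuel, h with
    | fuel + 1, h =>
      rw [PySem.Chars.splitOn.go]
      by_cases hp : List.isPrefixOf ['/', '/'] (c :: t) = true
      · rw [if_pos hp]
        simp only [List.isPrefixOf, Bool.and_eq_true, beq_iff_eq] at hp
        obtain ⟨hc, hrest⟩ := hp
        subst hc
        cases t with
        | nil => simp at hrest
        | cons d t' =>
          simp only [List.isPrefixOf, Bool.and_eq_true, beq_iff_eq] at hrest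
          obtain ⟨hd, -⟩ := hrest
          subst hd
          refine ⟨PySem.Chars.splitOn.go ['/', '/'] fuel t' [] [], ?_⟩
          rw [show List.drop (['/', '/'] : List Char).length ('/' :: '/' :: t') = t' from rfl,
            pvGoAcc]
          simp [pvTrunc]
      · have hnt : pvTrunc (c :: t) = c :: pvTrunc t := by
          cases t with
          | nil => simp [pvTrunc]
          | cons d t' =>
            simp only [List.isPrefixOf, Bool.and_eq_true, beq_iff_eq] at hp
            have : ¬(c = '/' ∧ d = '/') := by
              intro ⟨h1, h2⟩; exact hp ⟨h1.symm, h2.symm, trivial⟩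
            simp [pvTrunc, this]
        obtain ⟨l, hl⟩ := ih fuel (c :: cur) (by simp only [List.length_cons] at h; omega)
        refine ⟨l, ?_⟩
        rw [if_neg hp, hl, hnt]
        simp
-- the first piece of split("//") is pvTrunc
lemma pvSplit2_head (cs : List Char) :
    (PySem.Chars.splitOn cs ['/', '/']).headD [] = pvTrunc cs := by
  obtain ⟨l, hl⟩ := pvGoHead cs (cs.length + 1) [] (by omega)
  rw [PySem.Chars.splitOn, hl]
  simp

-- ===== VERDICT (by name: the statement is the Claim_ definition above) =====
theorem removeStrings_spec : Claim_equal_removeStrings := by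
  intro line _
  unfold Spec_removeStrings removeStrings removeStrings_alt
  simp only [pvFoldA, List.nil_append, pvSplitOn_eq, pvEnumMap, pvTruncA, pvSplit2_head,
    PySem.Chars.join, show (((0 : Int) % 2 == 0) : Bool) = true from rfl, pvJoin_blank,
    Bool.not_true]
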